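-- pv_equiv track=rewrite | github.com/mikkj17/aoc2020 | python/14.py | compute_addresses
-- ===== SOURCE A (Python) =====
-- from typing import List, Tuple
--
-- def compute_addresses(address: str) -> List[str]:
--     ret = list()
--     count = address.count('X')
--     for i in range(2**count):
--         replacement = bin(i)[2:].zfill(count)
--         binary = address
--         for bit in replacement:
--             binary = binary.replace('X', bit, 1)
--         ret.append(int(binary, 2))
--     return ret
-- ===== SOURCE B (Python) =====
-- def compute_addresses(address: str):
--     def go(rest, acc):
--         j = rest.find('X')
--         if j == -1:
--             return [int(acc + rest, 2)]
--         pre = acc + rest[:j]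
--         return go(rest[j + 1:], pre + '0') + go(rest[j + 1:], pre + '1')
--     return go(address, '')
-- ===== Notes on version B (the rewrite author's own statement) =====
-- stated objective: alternative
-- what changed: Replaced A's 2**count counter with bin()/zfill()/repeated one-shot str.replace per index by a recursive DFS that jumps to each wildcard with str.find and branches zero then one, emitting int(prefix,2) at the leaves in the same increasing order.
import Mathlib
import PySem

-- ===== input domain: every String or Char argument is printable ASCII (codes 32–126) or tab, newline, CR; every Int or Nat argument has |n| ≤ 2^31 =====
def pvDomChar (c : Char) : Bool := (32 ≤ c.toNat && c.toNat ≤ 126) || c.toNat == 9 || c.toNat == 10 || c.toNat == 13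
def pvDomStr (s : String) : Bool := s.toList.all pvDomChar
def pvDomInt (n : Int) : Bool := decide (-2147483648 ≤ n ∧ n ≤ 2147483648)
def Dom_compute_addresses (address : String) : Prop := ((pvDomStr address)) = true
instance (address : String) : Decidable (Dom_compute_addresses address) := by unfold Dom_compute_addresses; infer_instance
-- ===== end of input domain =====

-- B replaces A's 2**count counter / bin / zfill / repeated str.replace by a DFS that branches 0-then-1
-- at each 'X' (objective: alternative; same output list, identical order).

-- ===== PORT A =====
-- hand port of binary.replace('X', bit, 1): replace the FIRST occurrence of 'X' (exact for a
-- one-character pattern, which is the only way A uses str.replace)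
def replaceFirstX : List Char → Char → List Char
  | [], _ => []
  | c :: rest, bit => if c = 'X' then bit :: rest else c :: replaceFirstX rest bit

def compute_addresses (address : String) : List Int :=
  let count := PySem.Str.count address "X"
  (PySem.List.pyRange 0 ((2 : Int) ^ count) 1).foldl (fun ret i =>
    let replacement := PySem.Chars.zfill (PySem.List.slice (PySem.Int.toBinChars0b i) (some 2) none) (count : Int)
    let binary := replacement.foldl (fun b bit => replaceFirstX b bit) address.toList
    -- int(binary, 2); the ValueError case (none) is excluded by Pre_
    ret ++ [(PySem.Int.ofCharsBase? binary 2).getD 0]) []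

-- ===== PORT B =====
-- termination helper for the DFS: after cutting at a found 'X' the suffix is strictly shorter
theorem pv_cut_lt (rest : List Char) (h : ¬ PySem.Chars.find rest ['X'] = -1) :
    (PySem.List.slice rest (some (PySem.Chars.find rest ['X'] + 1)) none).length < rest.length := by
  have h0 : (0 : Int) ≤ PySem.Chars.find rest ['X'] := by
    have := PySem.Chars.neg_one_le_find rest ['X']
    omega
  have hmem : ['X'] <:+: rest := (PySem.Chars.find_ne_neg_one_iff rest ['X']).1 h
  have hne : rest ≠ [] := by
    rintro rfl
    simp [List.infix_nil] at hmem
  rw [PySem.List.slice_from rest (by omega : (0:Int) ≤ PySem.Chars.find rest ['X'] + 1)]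
  have : 1 ≤ (PySem.Chars.find rest ['X'] + 1).toNat := by omega
  have hlen : 0 < rest.length := List.length_pos_iff.2 hne
  simp only [List.length_drop]
  omega

def compute_addresses_go (rest acc : List Char) : List Int :=
  let j := PySem.Chars.find rest ['X']
  if h : j = -1 then [(PySem.Int.ofCharsBase? (acc ++ rest) 2).getD 0]
  else
    let pre := acc ++ PySem.List.slice rest none (some j)
    compute_addresses_go (PySem.List.slice rest (some (j + 1)) none) (pre ++ ['0']) ++
      compute_addresses_go (PySem.List.slice rest (some (j + 1)) none) (pre ++ ['1'])
termination_by rest.length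
decreasing_by all_goals exact pv_cut_lt rest h

def compute_addresses_alt (address : String) : List Int :=
  compute_addresses_go address.toList []

-- ===== PRECONDITION & SPEC =====
-- Pre_ holds exactly when int(binary, 2) never raises on any iteration: the all-zeros and the
-- all-ones substitutions of the wildcards are the two extreme cases, so if both parse as base-2
-- ints then every substitution does.
def Pre_compute_addresses (address : String) : Prop :=
  (PySem.Int.ofStrBase? (PySem.Str.replace address "X" "0") 2).isSome = true ∧
  (PySem.Int.ofStrBase? (PySem.Str.replace address "X" "1") 2).isSome = true
instance (address : String) : Decidable (Pre_compute_addresses address) := by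
  unfold Pre_compute_addresses; infer_instance

def pvWitness_compute_addresses : String := "X0X1"

def Spec_compute_addresses (address : String) (out : List Int) : Prop := out = compute_addresses_alt address
instance (address : String) (out : List Int) : Decidable (Spec_compute_addresses address out) := by unfold Spec_compute_addresses; infer_instance

-- ===== CLAIM (what is proved, stated in full; the proofs are below) =====
def Claim_equal_compute_addresses : Prop := ∀ (address : String), Dom_compute_addresses address → Pre_compute_addresses address → Spec_compute_addresses address (compute_addresses address)

-- ===== LEMMAS AND PROOFS =====

-- int(cs, 2), totalised (Pre_ rules out the none case on both sides)
def pvParse (cs : List Char) : Int := (PySem.Int.ofCharsBase? cs 2).getD 0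

-- the `count`-wide binary expansion of n: bin(n)[2:].zfill(count) as A builds it
def pvPad : Nat → Nat → List Char
  | 0, _ => []
  | c + 1, n => pvPad c (n / 2) ++ [Nat.digitChar (n % 2)]

-- substitute bits for the 'X's, left to right
def pvSubst : List Char → List Char → List Char
  | [], _ => []
  | c :: cs, bs =>
    if c = 'X' then
      match bs with
      | [] => c :: cs
      | b :: bs' => b :: pvSubst cs bs'
    else c :: pvSubst cs bs

theorem pv_count_go (l : List Char) : ∀ (fuel : Nat) (acc : Nat), l.length ≤ fuel →
    PySem.Chars.count.go ['X'] fuel l acc = acc + l.count 'X' := by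
  induction l with
  | nil => intro fuel acc _; cases fuel <;> simp [PySem.Chars.count.go]
  | cons c t ih =>
    intro fuel acc hf
    cases fuel with
    | zero => simp at hf
    | succ f =>
      rw [PySem.Chars.count.go]
      simp only [List.length_cons, Nat.add_le_add_iff_right] at hf
      by_cases hc : c = 'X'
      · subst hc
        rw [if_pos (by simp [List.isPrefixOf])]
        simp only [List.length_singleton, List.drop_one, List.tail_cons]
        rw [ih f (acc + 1) hf, List.count_cons]
        simp
        omega
      · rw [if_neg (by simp [List.isPrefixOf]; exact fun h => hc h.symm)]
        rw [ih f acc hf, List.count_cons]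
        simp [hc]

theorem pv_count (cs : List Char) : PySem.Chars.count cs ['X'] = cs.count 'X' := by
  simp only [PySem.Chars.count]
  rw [if_neg (by decide), pv_count_go cs cs.length 0 (le_refl _)]
  omega


theorem pv_toDigits_mem (n : Nat) : ∀ c ∈ Nat.toDigits 2 n, c = '0' ∨ c = '1' := by
  induction n using Nat.strong_induction_on with
  | _ n ih =>
    by_cases h : n < 2
    · rw [Nat.toDigits_of_lt_base h]
      interval_cases n <;> simp [Nat.digitChar]
    · rw [Nat.toDigits_of_base_le one_lt_two (by omega)]
      intro c hc
      rcases List.mem_append.1 hc with h1 | h1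
      · exact ih (n / 2) (by omega) c h1
      · simp only [List.mem_singleton] at h1
        subst h1
        have : n % 2 < 2 := Nat.mod_lt _ (by omega)
        interval_cases h2 : n % 2 <;> simp [Nat.digitChar]


theorem pv_pad_zero (c : Nat) : pvPad c 0 = List.replicate c '0' := by
  induction c with
  | zero => rfl
  | succ c ih => simp [pvPad, ih, Nat.digitChar, List.replicate_succ']


theorem pv_pad_eq (c : Nat) : ∀ n : Nat, n < 2 ^ (c + 1) →
    List.replicate ((c + 1) - (Nat.toDigits 2 n).length) '0' ++ Nat.toDigits 2 n = pvPad (c + 1) n := by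
  induction c with
  | zero =>
    intro n hn
    have hn2 : n < 2 := by simpa using hn
    rw [Nat.toDigits_of_lt_base hn2]
    have : n % 2 = n := Nat.mod_eq_of_lt hn2
    simp [pvPad, this]
  | succ c ih =>
    intro n hn
    by_cases h2 : n < 2
    · rw [Nat.toDigits_of_lt_base h2]
      have hd : n / 2 = 0 := Nat.div_eq_of_lt h2
      have hm : n % 2 = n := Nat.mod_eq_of_lt h2
      show List.replicate (c + 1 + 1 - 1) '0' ++ [Nat.digitChar n] =
        pvPad (c + 1) (n / 2) ++ [Nat.digitChar (n % 2)]
      rw [hd, hm, pv_pad_zero]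
      norm_num
    · rw [Nat.toDigits_of_base_le one_lt_two (by omega)]
      have hdivlt : n / 2 < 2 ^ (c + 1) := by
        have hp : (2:Nat) ^ (c + 2) = 2 ^ (c + 1) * 2 := by ring
        exact Nat.div_lt_of_lt_mul (by omega)
      have hlen : (Nat.toDigits 2 (n / 2)).length ≤ c + 1 :=
        (Nat.length_toDigits_le_iff one_lt_two (Nat.succ_pos c)).2 hdivlt
      simp only [List.length_append, List.length_singleton]
      conv_rhs => rw [pvPad]
      rw [← ih (n / 2) hdivlt]
      rw [← List.append_assoc]
      have harith : c + 1 + 1 - ((Nat.toDigits 2 (n / 2)).length + 1)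
          = c + 1 - (Nat.toDigits 2 (n / 2)).length := by omega
      rw [harith]


theorem pv_zfill (c n : Nat) (h : n < 2 ^ (c + 1)) :
    PySem.Chars.zfill (Nat.toDigits 2 n) ((c + 1 : Nat) : Int) = pvPad (c + 1) n := by
  have hlen : (Nat.toDigits 2 n).length ≤ c + 1 :=
    (Nat.length_toDigits_le_iff one_lt_two (Nat.succ_pos c)).2 h
  have hpos : 0 < (Nat.toDigits 2 n).length := Nat.length_toDigits_pos
  simp only [PySem.Chars.zfill]
  by_cases hle : ((c + 1 : Nat) : Int) ≤ ((Nat.toDigits 2 n).length : Int)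
  · rw [if_pos hle]
    have hl : (Nat.toDigits 2 n).length = c + 1 := by omega
    have := pv_pad_eq c n h
    rw [hl] at this
    simpa using this
  · rw [if_neg hle]
    obtain ⟨d, rest, hd⟩ : ∃ d rest, Nat.toDigits 2 n = d :: rest := by
      cases hds : Nat.toDigits 2 n with
      | nil => rw [hds] at hpos; simp at hpos
      | cons d rest => exact ⟨d, rest, rfl⟩
    have hdmem : d = '0' ∨ d = '1' := pv_toDigits_mem n d (by rw [hd]; exact List.mem_cons_self)
    rw [hd]
    split
    · next c1 rest1 heq =>
      obtain ⟨rfl, rfl⟩ : d = c1 ∧ rest = rest1 := by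
        injection heq with h1 h2; exact ⟨h1, h2⟩
      rw [if_neg (by rcases hdmem with h1 | h1 <;> simp [h1])]
      rw [← hd]
      have ht : ((c + 1 : Nat) : Int).toNat = c + 1 := by omega
      rw [ht]
      exact pv_pad_eq c n h
    · next heq => exact absurd heq (by simp)


theorem pv_pad_mem (c : Nat) : ∀ (n : Nat), ∀ b ∈ pvPad c n, b = '0' ∨ b = '1' := by
  induction c with
  | zero => intro n b hb; simp [pvPad] at hb
  | succ c ih =>
    intro n b hb
    simp only [pvPad] at hb
    rcases List.mem_append.1 hb with h1 | h1
    · exact ih (n / 2) b h1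
    · simp only [List.mem_singleton] at h1
      subst h1
      have : n % 2 < 2 := Nat.mod_lt _ (by omega)
      interval_cases h2 : n % 2 <;> simp [Nat.digitChar]


theorem pv_subst_nil_bits (cs : List Char) : pvSubst cs [] = cs := by
  induction cs with
  | nil => rfl
  | cons c t ih =>
    by_cases hc : c = 'X'
    · simp [pvSubst, hc]
    · simp [pvSubst, hc, ih]


theorem pv_replaceFirst_subst (b : Char) (hb : b ≠ 'X') (cs bs : List Char) :
    pvSubst (replaceFirstX cs b) bs = pvSubst cs (b :: bs) := by
  induction cs with
  | nil => rfl
  | cons c t ih =>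
    by_cases hc : c = 'X'
    · subst hc
      simp [replaceFirstX, pvSubst, hb]
    · simp [replaceFirstX, pvSubst, hc, ih]


theorem pv_foldl_replace (bs : List Char) : ∀ cs : List Char, (∀ b ∈ bs, b ≠ 'X') →
    bs.foldl replaceFirstX cs = pvSubst cs bs := by
  induction bs with
  | nil => intro cs _; simp [pv_subst_nil_bits]
  | cons b bs ih =>
    intro cs hb
    simp only [List.foldl_cons]
    rw [ih (replaceFirstX cs b) (fun x hx => hb x (List.mem_cons_of_mem _ hx)),
      pv_replaceFirst_subst b (hb b List.mem_cons_self) cs bs]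


theorem pv_subst_noX (cs : List Char) (h : 'X' ∉ cs) (bs : List Char) : pvSubst cs bs = cs := by
  induction cs with
  | nil => rfl
  | cons c t ih =>
    have hc : c ≠ 'X' := fun hc => h (hc ▸ List.mem_cons_self)
    simp [pvSubst, hc, ih (fun hm => h (List.mem_cons_of_mem _ hm))]


theorem pv_subst_append_noX (p : List Char) (hp : 'X' ∉ p) (cs bs : List Char) :
    pvSubst (p ++ cs) bs = p ++ pvSubst cs bs := by
  induction p with
  | nil => simp
  | cons c t ih =>
    have hc : c ≠ 'X' := fun hc => hp (hc ▸ List.mem_cons_self)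
    simp only [List.cons_append, pvSubst, if_neg hc]
    rw [ih (fun hm => hp (List.mem_cons_of_mem _ hm))]


theorem pv_pad_lo (c : Nat) : ∀ n, n < 2 ^ c → pvPad (c + 1) n = '0' :: pvPad c n := by
  induction c with
  | zero => intro n hn; interval_cases n; rfl
  | succ c ih =>
    intro n hn
    have h2 : n / 2 < 2 ^ c := by
      have : (2:Nat) ^ (c+1) = 2 ^ c * 2 := by ring
      exact Nat.div_lt_of_lt_mul (by omega)
    show pvPad (c + 1) (n / 2) ++ [Nat.digitChar (n % 2)] = '0' :: pvPad (c + 1) n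
    rw [ih (n / 2) h2]
    rfl


theorem pv_pad_hi (c : Nat) : ∀ n, n < 2 ^ c → pvPad (c + 1) (2 ^ c + n) = '1' :: pvPad c n := by
  induction c with
  | zero => intro n hn; interval_cases n; rfl
  | succ c ih =>
    intro n hn
    have h2 : n / 2 < 2 ^ c := by
      have : (2:Nat) ^ (c+1) = 2 ^ c * 2 := by ring
      exact Nat.div_lt_of_lt_mul (by omega)
    have hp : (2:Nat) ^ (c+1) = 2 * 2 ^ c := by ring
    have hdiv : (2 ^ (c + 1) + n) / 2 = 2 ^ c + n / 2 := by omega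
    have hmod : (2 ^ (c + 1) + n) % 2 = n % 2 := by omega
    show pvPad (c + 1) ((2 ^ (c + 1) + n) / 2) ++ [Nat.digitChar ((2 ^ (c + 1) + n) % 2)]
        = '1' :: pvPad (c + 1) n
    rw [hdiv, hmod, ih (n / 2) h2]
    rfl


theorem pv_singleton_infix (a : Char) (cs : List Char) : [a] <:+: cs ↔ a ∈ cs := by
  constructor
  · rintro ⟨s, t, rfl⟩
    simp
  · intro h
    obtain ⟨s, t, rfl⟩ := List.append_of_mem h
    exact ⟨s, t, by simp⟩


theorem pv_find_decomp (cs : List Char) (h : 'X' ∈ cs) :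
    ∃ p q, cs = p ++ 'X' :: q ∧ 'X' ∉ p ∧ PySem.Chars.find cs ['X'] = (p.length : Int) := by
  have hrest : cs.dropWhile (· != 'X') ≠ [] := by
    intro h0
    rw [List.dropWhile_eq_nil_iff] at h0
    have := h0 'X' h
    simp at this
  set p := cs.takeWhile (· != 'X') with hpdef
  set r := cs.dropWhile (· != 'X') with hrdef
  have hhead : ∀ (w : r ≠ []), r.head w = 'X' := by
    intro w
    have := List.head_dropWhile_not (· != 'X') (l := cs) w
    simpa using this
  obtain ⟨a, q, haq⟩ : ∃ a q, r = a :: q := by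
    cases hr : r with
    | nil => exact absurd hr hrest
    | cons a q => exact ⟨a, q, rfl⟩
  have ha : a = 'X' := by
    have := hhead hrest
    simp only [haq, List.head_cons] at this
    exact this
  subst ha
  have hcs : cs = p ++ 'X' :: q := by
    rw [← haq, hpdef, hrdef, List.takeWhile_append_dropWhile]
  have hp : 'X' ∉ p := by
    intro hm
    have := List.mem_takeWhile_imp hm
    simp at this
  refine ⟨p, q, hcs, hp, ?_⟩
  have hin : ['X'] <:+: cs := (pv_singleton_infix 'X' cs).2 h
  have h0 : 0 ≤ PySem.Chars.find cs ['X'] := (PySem.Chars.find_nonneg_iff cs ['X']).2 hin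
  obtain ⟨hpre, hmin⟩ := PySem.Chars.find_spec h0
  have hle : (PySem.Chars.find cs ['X']).toNat ≤ p.length := by
    by_contra hlt
    push_neg at hlt
    refine hmin p.length hlt ?_
    rw [hcs, List.drop_left]
    exact ⟨q, rfl⟩
  have hge : p.length ≤ (PySem.Chars.find cs ['X']).toNat := by
    by_contra hlt
    push_neg at hlt
    obtain ⟨t, ht⟩ := hpre
    have hhd : cs[(PySem.Chars.find cs ['X']).toNat]? = some 'X' := by
      rw [← List.head?_drop, ← ht]
      rfl
    have hpe := List.getElem?_append_left (l₁ := p) (l₂ := 'X' :: q) hlt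
    rw [← hcs] at hpe
    rw [hpe] at hhd
    exact hp (List.mem_of_getElem? hhd)
  have := Int.toNat_of_nonneg h0
  omega


theorem pv_goB (rest acc : List Char) :
    compute_addresses_go rest acc =
      (List.range (2 ^ (rest.count 'X'))).map
        (fun n => pvParse (acc ++ pvSubst rest (pvPad (rest.count 'X') n))) := by
  induction rest, acc using compute_addresses_go.induct with
  | case1 rest acc j hj =>
    have hj' : PySem.Chars.find rest ['X'] = -1 := hj
    have hnm : 'X' ∉ rest := by
      intro hm
      obtain ⟨p, q, hcs, hp, hfind⟩ := pv_find_decomp rest hm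
      rw [hfind] at hj'
      omega
    have hc0 : rest.count 'X' = 0 := List.count_eq_zero.2 hnm
    rw [compute_addresses_go, dif_pos hj', hc0]
    simp [pvParse, pvPad, pv_subst_nil_bits]
  | case2 rest acc j hj pre ih0 ih1 =>
    have hjval : j = PySem.Chars.find rest ['X'] := rfl
    have hpreval : pre = acc ++ PySem.List.slice rest none (some j) := rfl
    rw [hpreval, hjval] at ih0 ih1
    have hj' : ¬ PySem.Chars.find rest ['X'] = -1 := hjval ▸ hj
    have hmem : 'X' ∈ rest :=
      (pv_singleton_infix 'X' rest).1 ((PySem.Chars.find_ne_neg_one_iff rest ['X']).1 hj')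
    obtain ⟨p, q, hcs, hp, hfind⟩ := pv_find_decomp rest hmem
    have hslice1 : PySem.List.slice rest (some (PySem.Chars.find rest ['X'] + 1)) none = q := by
      rw [PySem.List.slice_from rest (by rw [hfind]; omega)]
      rw [show (PySem.Chars.find rest ['X'] + 1).toNat = (p ++ ['X']).length by
        rw [hfind]; simp]
      rw [hcs, show p ++ 'X' :: q = (p ++ ['X']) ++ q by simp]
      exact List.drop_left
    have hslice0 : PySem.List.slice rest none (some (PySem.Chars.find rest ['X'])) = p := by
      rw [PySem.List.slice_to rest (by rw [hfind]; omega), hfind]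
      rw [show ((p.length : Int)).toNat = p.length by omega]
      rw [hcs, List.take_left]
    have hcount : rest.count 'X' = q.count 'X' + 1 := by
      rw [hcs]
      simp [List.count_append, List.count_eq_zero.2 hp]
    rw [hslice1, hslice0] at ih0 ih1
    rw [compute_addresses_go, dif_neg hj']
    simp only [hslice1, hslice0]
    rw [ih0, ih1, hcount, pow_succ, Nat.mul_two, List.range_add, List.map_append, List.map_map]
    congr 1
    · refine List.map_congr_left (fun n hn => ?_)
      have hlt : n < 2 ^ (q.count 'X') := List.mem_range.1 hn
      rw [pv_pad_lo (q.count 'X') n hlt, hcs, pv_subst_append_noX p hp]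
      simp [pvSubst, pvParse]
    · refine List.map_congr_left (fun n hn => ?_)
      have hlt : n < 2 ^ (q.count 'X') := List.mem_range.1 hn
      simp only [Function.comp]
      rw [pv_pad_hi (q.count 'X') n hlt, hcs, pv_subst_append_noX p hp]
      simp [pvSubst, pvParse]


theorem pv_range_cast (c : Nat) :
    PySem.List.pyRange 0 ((2:Int)^c) 1 = List.map (fun k => ((k : Nat) : Int)) (List.range (2^c)) := by
  rw [PySem.List.pyRange_of_pos 0 ((2:Int)^c) one_pos]
  have h2 : (0:Int) < 2^c := by positivity
  rw [if_pos h2]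
  have h1 : (((2:Int)^c - 0 + 1 - 1) / 1).toNat = 2^c := by
    have he : ((2:Int)^c - 0 + 1 - 1) = ((2^c : Nat) : Int) := by push_cast; ring
    rw [he, Int.ediv_one, Int.toNat_natCast]
  rw [h1]
  exact List.map_congr_left (fun k _ => by ring)

-- ===== VERDICT (by name: the statement is the Claim_ definition above) =====
theorem compute_addresses_spec : Claim_equal_compute_addresses := by
  intro address _ _
  show compute_addresses address = compute_addresses_alt address
  simp only [compute_addresses, compute_addresses_alt]
  rw [PySem.Str.count_eq, show ("X" : String).toList = ['X'] from rfl, pv_count]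
  rw [pv_range_cast, pv_goB]
  rw [PySem.List.foldl_append_singleton_eq_map
    (fun i => (PySem.Int.ofCharsBase?
      ((PySem.Chars.zfill (PySem.List.slice (PySem.Int.toBinChars0b i) (some 2) none)
        ((address.toList.count 'X' : Nat) : Int)).foldl (fun b bit => replaceFirstX b bit)
        address.toList) 2).getD 0)]
  rw [List.nil_append, List.map_map]
  refine List.map_congr_left (fun n hn => ?_)
  have hlt : n < 2 ^ (address.toList.count 'X') := List.mem_range.1 hn
  simp only [Function.comp]
  have hbin : PySem.Int.toBinChars0b (n : Int) = '0' :: 'b' :: Nat.toDigits 2 n := by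
    rw [PySem.Int.toBinChars0b, if_neg (by omega), Int.toNat_natCast]
  rw [hbin, PySem.List.slice_from _ (by omega : (0:Int) ≤ 2)]
  rw [show ((2:Int)).toNat = 2 from rfl]
  rw [show List.drop 2 ('0' :: 'b' :: Nat.toDigits 2 n) = Nat.toDigits 2 n from rfl]
  cases hc : address.toList.count 'X' with
  | zero =>
    rw [hc] at hlt
    interval_cases n
    rw [Nat.toDigits_zero]
    rw [show PySem.Chars.zfill ['0'] ((0:Nat) : Int) = ['0'] by
      simp [PySem.Chars.zfill]]
    have hnoX : 'X' ∉ address.toList := List.count_eq_zero.1 hc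
    rw [show List.foldl (fun b bit => replaceFirstX b bit) address.toList ['0']
        = pvSubst address.toList ['0'] from
      pv_foldl_replace ['0'] address.toList (by intro b hb; simp at hb; subst hb; decide)]
    rw [pv_subst_noX address.toList hnoX, pv_subst_noX address.toList hnoX]
    rfl
  | succ c' =>
    rw [hc] at hlt
    rw [pv_zfill c' n hlt]
    rw [show List.foldl (fun b bit => replaceFirstX b bit) address.toList (pvPad (c' + 1) n)
        = pvSubst address.toList (pvPad (c' + 1) n) from
      pv_foldl_replace (pvPad (c' + 1) n) address.toList
        (fun b hb => by rcases pv_pad_mem (c' + 1) n b hb with h1 | h1 <;> subst h1 <;> decide)]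
    rfl
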